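-- pv_equiv track=rewrite | github.com/geswanel/Algorithms | YaAlgoTrainings/Training4.0/0WarmUp/warmup.py | avg_disconnect
-- ===== SOURCE A (Python) =====
-- def avg_disconnect(arr):
--     prefix = [0]
--     for i in range(0, len(arr)):
--         prefix.append(prefix[-1] + arr[i])
--
--
--     disconnect = []
--     last_id = len(prefix) - 1
--     for i in range(0, len(arr)):
--         disconnect.append(arr[i] * i - prefix[i] + \
--                           (prefix[-1] - prefix[i + 1] - arr[i] * (last_id - i - 1)))
--
--     return disconnect
-- ===== SOURCE B (Python) =====
-- def avg_disconnect(arr):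
--     res = []
--     for i in range(len(arr)):
--         acc = 0
--         for j in range(len(arr)):
--             if j < i:
--                 acc += arr[i] - arr[j]
--             elif j > i:
--                 acc += arr[j] - arr[i]
--         res.append(acc)
--     return res
-- ===== Notes on version B (the rewrite author's own statement) =====
-- stated objective: alternative
-- what changed: B drops A's prefix-sum table entirely and computes each element's value by a direct double loop over all pairs, adding arr[i]-arr[j] for j<i and arr[j]-arr[i] for j>i.
import Mathlib
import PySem

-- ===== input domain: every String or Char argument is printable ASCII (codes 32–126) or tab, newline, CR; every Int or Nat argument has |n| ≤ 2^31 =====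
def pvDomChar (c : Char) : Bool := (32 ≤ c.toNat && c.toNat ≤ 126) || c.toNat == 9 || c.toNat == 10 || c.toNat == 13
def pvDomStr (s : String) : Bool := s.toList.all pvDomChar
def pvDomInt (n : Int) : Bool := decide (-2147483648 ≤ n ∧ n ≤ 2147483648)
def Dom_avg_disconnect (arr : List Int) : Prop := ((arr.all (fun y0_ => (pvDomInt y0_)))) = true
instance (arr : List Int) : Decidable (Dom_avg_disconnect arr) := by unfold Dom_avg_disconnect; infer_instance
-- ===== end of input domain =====

-- B replaces A's prefix-sum table by a direct double loop over all index pairs (alternative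
-- decomposition of the same signed sum of differences; not faster — O(n^2) vs A's O(n)).

-- ===== PORT A =====
-- prefix[-1] and in-range indexing are total in A; ported with pyGetD (default never used).
def avg_disconnect (arr : List Int) : List Int :=
  let prefix_ := (PySem.List.pyRange 0 (PySem.List.len arr) 1).foldl
      (fun p i => p ++ [PySem.List.pyGetD p (-1) 0 + PySem.List.pyGetD arr i 0]) [0]
  let last_id : Int := PySem.List.len prefix_ - 1
  (PySem.List.pyRange 0 (PySem.List.len arr) 1).foldl
      (fun d i => d ++ [PySem.List.pyGetD arr i 0 * i - PySem.List.pyGetD prefix_ i 0 +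
        (PySem.List.pyGetD prefix_ (-1) 0 - PySem.List.pyGetD prefix_ (i + 1) 0 -
         PySem.List.pyGetD arr i 0 * (last_id - i - 1))]) []

-- ===== PORT B =====
def avg_disconnect_alt (arr : List Int) : List Int :=
  (PySem.List.pyRange 0 (PySem.List.len arr) 1).foldl
    (fun res i =>
      res ++ [(PySem.List.pyRange 0 (PySem.List.len arr) 1).foldl
        (fun acc j =>
          if j < i then acc + (PySem.List.pyGetD arr i 0 - PySem.List.pyGetD arr j 0)
          else if j > i then acc + (PySem.List.pyGetD arr j 0 - PySem.List.pyGetD arr i 0)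
          else acc) 0]) []

-- ===== PRECONDITION & SPEC =====
def Spec_avg_disconnect (arr : List Int) (out : List Int) : Prop := out = avg_disconnect_alt arr
instance (arr : List Int) (out : List Int) : Decidable (Spec_avg_disconnect arr out) := by unfold Spec_avg_disconnect; infer_instance

-- ===== CLAIM (what is proved, stated in full; the proofs are below) =====
def Claim_equal_avg_disconnect : Prop := ∀ (arr : List Int), Dom_avg_disconnect arr → Spec_avg_disconnect arr (avg_disconnect arr)

-- ===== LEMMAS AND PROOFS =====

-- the common closed form of element k of both outputs
def pvF (arr : List Int) (k : Nat) : Int :=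
  arr.getD k 0 * k - (arr.take k).sum +
    (arr.sum - (arr.take (k + 1)).sum - arr.getD k 0 * ((arr.length : Int) - k - 1))

theorem pv_sum_map_csub (l : List Int) (c : Int) :
    (l.map (fun x => c - x)).sum = l.length * c - l.sum := by
  induction l with
  | nil => simp
  | cons a t ih => simp [ih]; ring

theorem pv_sum_map_subc (l : List Int) (c : Int) :
    (l.map (fun x => x - c)).sum = l.sum - l.length * c := by
  induction l with
  | nil => simp
  | cons a t ih => simp [ih]; ring

theorem pv_sum_drop (arr : List Int) (m : Nat) :
    (arr.drop m).sum = arr.sum - (arr.take m).sum := by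
  have h2 : arr.sum = (arr.take m).sum + (arr.drop m).sum := by
    conv_lhs => rw [← arr.take_append_drop m]
    simp
  omega

theorem pv_prefix_eq (arr : List Int) (m : Nat) (hm : m ≤ arr.length) :
    (PySem.List.pyRange 0 m 1).foldl
      (fun p i => p ++ [PySem.List.pyGetD p (-1) 0 + PySem.List.pyGetD arr i 0]) [0]
    = (List.range (m + 1)).map (fun k => (arr.take k).sum) := by
  induction m with
  | zero =>
    simp [PySem.List.pyRange_one_eq_nil]
  | succ m ih =>
    have hmlt : m < arr.length := hm
    have hcast : ((m + 1 : Nat) : Int) = (m : Int) + 1 := by push_cast; ring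
    rw [hcast, PySem.List.pyRange_one_succ_right (by positivity), List.foldl_append,
        ih (Nat.le_of_succ_le hm), List.foldl_cons, List.foldl_nil]
    have hsplit : (List.range (m + 1)).map (fun k => (arr.take k).sum)
        = (List.range m).map (fun k => (arr.take k).sum) ++ [(arr.take m).sum] := by
      rw [List.range_succ, List.map_append]; simp
    rw [hsplit, PySem.List.pyGetD_neg_one_append_singleton]
    rw [List.range_succ (n := m + 1), List.map_append, ← hsplit]
    simp [List.sum_take_succ arr m hmlt, List.getElem?_eq_getElem hmlt]

theorem pv_A_eq (arr : List Int) :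
    avg_disconnect arr = (List.range arr.length).map (pvF arr) := by
  simp only [avg_disconnect, PySem.List.len_eq]
  rw [pv_prefix_eq arr arr.length le_rfl]
  rw [PySem.List.foldl_append_singleton_eq_map, PySem.List.pyRange_zero_natCast, List.map_map]
  simp only [List.nil_append]
  apply List.map_congr_left
  intro k hk
  have hk' : k < arr.length := List.mem_range.mp hk
  have hlen : ((List.range (arr.length + 1)).map (fun k => (arr.take k).sum)).length
      = arr.length + 1 := by simp
  have hlast : PySem.List.pyGetD
      ((List.range (arr.length + 1)).map (fun k => (arr.take k).sum)) (-1) 0 = arr.sum := by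
    rw [List.range_succ, List.map_append]
    simp [PySem.List.pyGetD_neg_one_append_singleton]
  have hgk : PySem.List.pyGetD
      ((List.range (arr.length + 1)).map (fun k => (arr.take k).sum)) (k : Int) 0
      = (arr.take k).sum := by
    simp [List.getD_eq_getElem?_getD, Nat.lt_succ_of_lt hk']
  have hgk1 : PySem.List.pyGetD
      ((List.range (arr.length + 1)).map (fun k => (arr.take k).sum)) ((k : Int) + 1) 0
      = (arr.take (k + 1)).sum := by
    have hc : ((k : Int) + 1) = ((k + 1 : Nat) : Int) := by push_cast; ring
    rw [hc, PySem.List.pyGetD_natCast]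
    simp [List.getD_eq_getElem?_getD, Nat.succ_lt_succ hk']
  simp only [Function.comp, hlast, hgk, hgk1, PySem.List.pyGetD_natCast, hlen]
  unfold pvF
  push_cast
  ring

-- element k of B: the inner double-loop body equals the closed form
theorem pv_inner (arr : List Int) (k : Nat) (hk' : k < arr.length) :
    (PySem.List.pyRange 0 (arr.length : Int) 1).foldl
      (fun acc j =>
        if j < (k : Int) then acc + (PySem.List.pyGetD arr (k : Int) 0 - PySem.List.pyGetD arr j 0)
        else if j > (k : Int) then acc + (PySem.List.pyGetD arr j 0 - PySem.List.pyGetD arr (k : Int) 0)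
        else acc) 0 = pvF arr k := by
  simp only [gt_iff_lt]
  rw [PySem.List.pyRange_one_append 0 (k : Int) (arr.length : Int) (by positivity)
        (by exact_mod_cast hk'.le), List.foldl_append,
      PySem.List.pyRange_one_cons (a := (k : Int)) (b := (arr.length : Int))
        (by exact_mod_cast hk'), List.foldl_cons]
  have hlen : (((arr.take k).length : Nat) : Int) = (k : Int) := by
    simp [Nat.min_eq_left hk'.le]
  have hmapL : (PySem.List.pyRange 0 (k : Int) 1).map (fun j => PySem.List.pyGetD arr j 0)
      = arr.take k := by
    have h0 := PySem.List.map_pyGetD_pyRange_zero' (xs := arr.take k) (d := 0)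
    rw [hlen] at h0
    rw [← h0]
    apply List.map_congr_left
    intro j hj
    obtain ⟨hj0, hj1⟩ := PySem.List.mem_pyRange_one.mp hj
    obtain ⟨m, rfl⟩ : ∃ m : Nat, j = (m : Int) := ⟨j.toNat, (Int.toNat_of_nonneg hj0).symm⟩
    have hm : m < k := by exact_mod_cast hj1
    simp [List.getD_eq_getElem?_getD, hm]
  have hmapR : (PySem.List.pyRange ((k : Int) + 1) (arr.length : Int) 1).map
        (fun j => PySem.List.pyGetD arr j 0) = arr.drop (k + 1) := by
    have h0 := PySem.List.map_pyGetD_pyRange' (xs := arr) (a := ((k : Int) + 1)) (d := 0)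
        (by positivity)
    have ht : ((k : Int) + 1).toNat = k + 1 := by omega
    rw [ht] at h0
    exact h0
  have hL : (PySem.List.pyRange 0 (k : Int) 1).foldl
      (fun acc j =>
        if j < (k : Int) then acc + (PySem.List.pyGetD arr (k : Int) 0 - PySem.List.pyGetD arr j 0)
        else if (k : Int) < j then acc + (PySem.List.pyGetD arr j 0 - PySem.List.pyGetD arr (k : Int) 0)
        else acc) 0
      = (PySem.List.pyRange 0 (k : Int) 1).foldl
        (fun acc j => acc + (PySem.List.pyGetD arr (k : Int) 0 - PySem.List.pyGetD arr j 0)) 0 := by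
    apply PySem.List.foldl_congr_mem
    intro acc j hj
    obtain ⟨h0, h1⟩ := PySem.List.mem_pyRange_one.mp hj
    rw [if_pos h1]
  rw [hL, PySem.List.foldl_add]
  rw [if_neg (lt_irrefl _), if_neg (lt_irrefl _)]
  have hR : ∀ init : Int, (PySem.List.pyRange ((k : Int) + 1) (arr.length : Int) 1).foldl
      (fun acc j =>
        if j < (k : Int) then acc + (PySem.List.pyGetD arr (k : Int) 0 - PySem.List.pyGetD arr j 0)
        else if (k : Int) < j then acc + (PySem.List.pyGetD arr j 0 - PySem.List.pyGetD arr (k : Int) 0)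
        else acc) init
      = (PySem.List.pyRange ((k : Int) + 1) (arr.length : Int) 1).foldl
        (fun acc j => acc + (PySem.List.pyGetD arr j 0 - PySem.List.pyGetD arr (k : Int) 0)) init := by
    intro init
    apply PySem.List.foldl_congr_mem
    intro acc j hj
    obtain ⟨h0, h1⟩ := PySem.List.mem_pyRange_one.mp hj
    rw [if_neg (by omega), if_pos (by omega)]
  rw [hR, PySem.List.foldl_add]
  have hsumL : ((PySem.List.pyRange 0 (k : Int) 1).map
      (fun j => PySem.List.pyGetD arr (k : Int) 0 - PySem.List.pyGetD arr j 0)).sum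
      = (k : Int) * PySem.List.pyGetD arr (k : Int) 0 - (arr.take k).sum := by
    rw [show ((PySem.List.pyRange 0 (k : Int) 1).map
        (fun j => PySem.List.pyGetD arr (k : Int) 0 - PySem.List.pyGetD arr j 0))
        = ((PySem.List.pyRange 0 (k : Int) 1).map (fun j => PySem.List.pyGetD arr j 0)).map
            (fun x => PySem.List.pyGetD arr (k : Int) 0 - x) from by rw [List.map_map]; rfl]
    rw [hmapL, pv_sum_map_csub]
    rw [show (((arr.take k).length : Nat) : Int) = (k : Int) from hlen]
  have hsumR : ((PySem.List.pyRange ((k : Int) + 1) (arr.length : Int) 1).map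
      (fun j => PySem.List.pyGetD arr j 0 - PySem.List.pyGetD arr (k : Int) 0)).sum
      = (arr.sum - (arr.take (k + 1)).sum)
        - ((arr.length : Int) - (k : Int) - 1) * PySem.List.pyGetD arr (k : Int) 0 := by
    rw [show ((PySem.List.pyRange ((k : Int) + 1) (arr.length : Int) 1).map
        (fun j => PySem.List.pyGetD arr j 0 - PySem.List.pyGetD arr (k : Int) 0))
        = ((PySem.List.pyRange ((k : Int) + 1) (arr.length : Int) 1).map
            (fun j => PySem.List.pyGetD arr j 0)).map
            (fun x => x - PySem.List.pyGetD arr (k : Int) 0) from by rw [List.map_map]; rfl]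
    rw [hmapR, pv_sum_map_subc, pv_sum_drop]
    have hlen2 : (((arr.drop (k + 1)).length : Nat) : Int)
        = (arr.length : Int) - (k : Int) - 1 := by
      simp [List.length_drop]
      omega
    rw [hlen2]
  rw [hsumL, hsumR]
  simp only [PySem.List.pyGetD_natCast]
  unfold pvF
  ring

theorem pv_B_eq (arr : List Int) :
    avg_disconnect_alt arr = (List.range arr.length).map (pvF arr) := by
  simp only [avg_disconnect_alt, PySem.List.len_eq]
  rw [PySem.List.foldl_append_singleton_eq_map]
  simp only [List.nil_append]
  rw [show ((List.range arr.length).map (pvF arr))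
        = (PySem.List.pyRange 0 (arr.length : Int) 1).map
            (fun i => pvF arr i.toNat) from by
      rw [PySem.List.pyRange_zero_natCast, List.map_map]
      apply List.map_congr_left
      intro k hk
      simp]
  apply List.map_congr_left
  intro i hi
  obtain ⟨hi0, hi1⟩ := PySem.List.mem_pyRange_one.mp hi
  obtain ⟨k, rfl⟩ : ∃ k : Nat, i = (k : Int) := ⟨i.toNat, (Int.toNat_of_nonneg hi0).symm⟩
  have hk' : k < arr.length := by exact_mod_cast hi1
  rw [Int.toNat_natCast]
  exact pv_inner arr k hk'

-- ===== VERDICT (by name: the statement is the Claim_ definition above) =====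
theorem avg_disconnect_spec : Claim_equal_avg_disconnect := by
  intro arr _
  unfold Spec_avg_disconnect
  rw [pv_A_eq, pv_B_eq]
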